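-- pv_equiv track=rewrite | github.com/AlonurKomilov/analyticbot | core/services/ai/predictive/predictive_intelligence/orchestrator/intelligence_aggregation_service.py | categorize_intelligence_data
-- ===== SOURCE A (Python) =====
-- from typing import Any
--
-- def categorize_intelligence_data(
--     intelligence_data: list[dict[str, Any]]
-- ) -> dict[str, Any]:
--     """
--     Categorize intelligence data by type.
--
--     Args:
--         intelligence_data: List of intelligence data items
--
--     Returns:
--         Categorized intelligence data
--     """
--     categories = {
--         "contextual": [],
--         "temporal": [],
--         "predictive": [],
--         "cross_channel": [],
--         "uncategorized": [],
--     }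
--
--     for data_item in intelligence_data:
--         data_type = data_item.get("type", "unknown")
--
--         if "contextual" in data_type.lower():
--             categories["contextual"].append(data_item)
--         elif "temporal" in data_type.lower():
--             categories["temporal"].append(data_item)
--         elif "predictive" in data_type.lower() or "prediction" in data_type.lower():
--             categories["predictive"].append(data_item)
--         elif "cross" in data_type.lower() or "channel" in data_type.lower():
--             categories["cross_channel"].append(data_item)
--         else:
--             categories["uncategorized"].append(data_item)
--
--     return categories
-- ===== SOURCE B (Python) =====
-- RULES = [
--     ("contextual", ["contextual"]),
--     ("temporal", ["temporal"]),
--     ("predictive", ["predictive", "prediction"]),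
--     ("cross_channel", ["cross", "channel"]),
-- ]
--
--
-- def _category_of(data_item):
--     data_type = data_item.get("type", "unknown").lower()
--     for name, keywords in RULES:
--         if any(kw in data_type for kw in keywords):
--             return name
--     return "uncategorized"
--
--
-- def categorize_intelligence_data(intelligence_data):
--     names = [name for name, _ in RULES] + ["uncategorized"]
--     return {
--         name: [item for item in intelligence_data if _category_of(item) == name]
--         for name in names
--     }
-- ===== Notes on version B (the rewrite author's own statement) =====
-- stated objective: idiomatic
-- what changed: Replace A's single-pass if/elif cascade that appends into a pre-built dict of lists with a declarative keyword rule table plus a per-item classifier, building the result as one filter of the input per category name.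
import Mathlib
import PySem

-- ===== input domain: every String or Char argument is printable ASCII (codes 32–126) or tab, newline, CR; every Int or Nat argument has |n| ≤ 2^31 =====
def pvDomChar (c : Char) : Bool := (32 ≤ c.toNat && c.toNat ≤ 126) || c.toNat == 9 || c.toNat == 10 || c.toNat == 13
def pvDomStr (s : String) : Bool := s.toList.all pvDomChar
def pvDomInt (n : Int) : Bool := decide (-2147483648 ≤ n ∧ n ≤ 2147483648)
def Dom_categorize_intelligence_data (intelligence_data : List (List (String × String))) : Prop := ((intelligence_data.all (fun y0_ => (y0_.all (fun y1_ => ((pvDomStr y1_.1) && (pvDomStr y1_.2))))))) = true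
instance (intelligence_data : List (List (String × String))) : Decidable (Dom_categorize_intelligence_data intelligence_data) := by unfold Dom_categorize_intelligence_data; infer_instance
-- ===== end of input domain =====

-- B replaces A's if/elif branch cascade with a declarative keyword rule table and builds each
-- category by filtering the input once per category name (idiomatic; not claimed faster).

-- ===== PORT A =====
-- A single pass: a dict of five empty category lists; each item is appended to the list of the
-- first matching branch.  'categories[k].append(item)' (k always present) = Dict.modify k [] (· ++ [item]).
def categorize_intelligence_data (intelligence_data : List (List (String × String))) : List (String × List (List (String × String))) :=
  let init : PySem.Dict String (List (List (String × String))) :=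
    PySem.Dict.mk [("contextual", []), ("temporal", []), ("predictive", []),
                   ("cross_channel", []), ("uncategorized", [])]
  (intelligence_data.foldl (fun categories data_item =>
      let data_type := (PySem.Dict.mk data_item).getD "type" "unknown"
      if PySem.Str.isIn "contextual" (PySem.Str.lower data_type) then
        categories.modify "contextual" [] (· ++ [data_item])
      else if PySem.Str.isIn "temporal" (PySem.Str.lower data_type) then
        categories.modify "temporal" [] (· ++ [data_item])
      else if PySem.Str.isIn "predictive" (PySem.Str.lower data_type)
              || PySem.Str.isIn "prediction" (PySem.Str.lower data_type) then
        categories.modify "predictive" [] (· ++ [data_item])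
      else if PySem.Str.isIn "cross" (PySem.Str.lower data_type)
              || PySem.Str.isIn "channel" (PySem.Str.lower data_type) then
        categories.modify "cross_channel" [] (· ++ [data_item])
      else
        categories.modify "uncategorized" [] (· ++ [data_item])) init).items

-- ===== PORT B =====
def pvRules : List (String × List String) :=
  [("contextual", ["contextual"]), ("temporal", ["temporal"]),
   ("predictive", ["predictive", "prediction"]), ("cross_channel", ["cross", "channel"])]

def pvScanRules (data_type : String) : List (String × List String) → String
  | [] => "uncategorized"
  | (name, keywords) :: rest =>
      if keywords.any (fun kw => PySem.Str.isIn kw data_type) then name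
      else pvScanRules data_type rest

def pvCategoryOf (data_item : List (String × String)) : String :=
  pvScanRules (PySem.Str.lower ((PySem.Dict.mk data_item).getD "type" "unknown")) pvRules

def categorize_intelligence_data_alt (intelligence_data : List (List (String × String))) : List (String × List (List (String × String))) :=
  let names := pvRules.map (·.1) ++ ["uncategorized"]
  names.map (fun name => (name, intelligence_data.filter (fun item => pvCategoryOf item == name)))

-- ===== PRECONDITION & SPEC =====
def Spec_categorize_intelligence_data (intelligence_data : List (List (String × String))) (out : List (String × List (List (String × String)))) : Prop := out = categorize_intelligence_data_alt intelligence_data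
instance (intelligence_data : List (List (String × String))) (out : List (String × List (List (String × String)))) : Decidable (Spec_categorize_intelligence_data intelligence_data out) := by unfold Spec_categorize_intelligence_data; infer_instance

-- ===== CLAIM (what is proved, stated in full; the proofs are below) =====
def Claim_equal_categorize_intelligence_data : Prop := ∀ (intelligence_data : List (List (String × String))), Dom_categorize_intelligence_data intelligence_data → Spec_categorize_intelligence_data intelligence_data (categorize_intelligence_data intelligence_data)

-- ===== LEMMAS AND PROOFS =====

-- The five category names, in A's and B's common order.
def pvCats : List String := ["contextual", "temporal", "predictive", "cross_channel", "uncategorized"]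

-- A's branch cascade appends the item at exactly the key B's rule scan computes.
lemma pvStep_eq (d : PySem.Dict String (List (List (String × String))))
    (x : List (String × String)) :
    (if PySem.Str.isIn "contextual" (PySem.Str.lower ((PySem.Dict.mk x).getD "type" "unknown")) then
        d.modify "contextual" [] (· ++ [x])
      else if PySem.Str.isIn "temporal" (PySem.Str.lower ((PySem.Dict.mk x).getD "type" "unknown")) then
        d.modify "temporal" [] (· ++ [x])
      else if PySem.Str.isIn "predictive" (PySem.Str.lower ((PySem.Dict.mk x).getD "type" "unknown"))
              || PySem.Str.isIn "prediction" (PySem.Str.lower ((PySem.Dict.mk x).getD "type" "unknown")) then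
        d.modify "predictive" [] (· ++ [x])
      else if PySem.Str.isIn "cross" (PySem.Str.lower ((PySem.Dict.mk x).getD "type" "unknown"))
              || PySem.Str.isIn "channel" (PySem.Str.lower ((PySem.Dict.mk x).getD "type" "unknown")) then
        d.modify "cross_channel" [] (· ++ [x])
      else d.modify "uncategorized" [] (· ++ [x]))
    = d.modify (pvCategoryOf x) [] (· ++ [x]) := by
  simp only [pvCategoryOf, pvRules, pvScanRules, List.any_cons, List.any_nil, Bool.or_false]
  split_ifs <;> rfl

lemma pvCategoryOf_mem (x : List (String × String)) : pvCategoryOf x ∈ pvCats := by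
  simp only [pvCategoryOf, pvRules, pvScanRules, pvCats]
  split_ifs <;> simp

lemma pvInit_getD (c : String) :
    (PySem.Dict.mk ([("contextual", []), ("temporal", []), ("predictive", []),
      ("cross_channel", []), ("uncategorized", [])] :
        List (String × List (List (String × String))))).getD c [] = [] := by
  rw [PySem.Dict.getD_eq_get?_getD]
  simp only [PySem.Dict.get?_mk_cons]
  split_ifs <;> rfl

-- ===== VERDICT (by name: the statement is the Claim_ definition above) =====
theorem categorize_intelligence_data_spec : Claim_equal_categorize_intelligence_data := by
  intro xs _
  unfold Spec_categorize_intelligence_data categorize_intelligence_data categorize_intelligence_data_alt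
  simp only [pvStep_eq]
  have hfm : ∀ (init : PySem.Dict String (List (List (String × String)))),
      xs.foldl (fun d x => d.modify (pvCategoryOf x) [] (· ++ [x])) init
      = (xs.map (fun y => (pvCategoryOf y, y))).foldl (fun d p => d.modify p.1 [] (· ++ [p.2])) init := by
    intro init; rw [List.foldl_map]
  rw [hfm]
  set init : PySem.Dict String (List (List (String × String))) :=
    PySem.Dict.mk [("contextual", []), ("temporal", []), ("predictive", []),
                   ("cross_channel", []), ("uncategorized", [])] with hinit
  set l := xs.map (fun y => (pvCategoryOf y, y)) with hl
  have hkeys : (l.foldl (fun d p => d.modify p.1 [] (· ++ [p.2])) init).keys = pvCats := by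
    rw [PySem.Dict.keys_foldl_modify_key]
    have hik : init.keys = pvCats := by decide
    rw [hik, PySem.Set.update_eq_append_filter]
    have : ((PySem.Set.ofList (l.map (·.1))).filter
        (fun y => !(PySem.Set.contains pvCats y))) = [] := by
      rw [List.filter_eq_nil_iff]
      intro y hy
      have hy' : y ∈ l.map (·.1) := (PySem.Set.mem_ofList _ _).mp hy
      simp only [hl, List.map_map, List.mem_map] at hy'
      obtain ⟨x, _, rfl⟩ := hy'
      have := pvCategoryOf_mem x
      simp [PySem.Set.contains_eq_listContains]
      simpa using this
    rw [this, List.append_nil]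
  have hnd : (l.foldl (fun d p => d.modify p.1 [] (· ++ [p.2])) init).keys.Nodup := by
    apply PySem.Dict.nodup_keys_foldl_modify_key
    decide
  rw [PySem.Dict.items_eq_map_keys _ hnd [], hkeys]
  have hnames : (pvRules.map (·.1) ++ ["uncategorized"]) = pvCats := by decide
  rw [hnames]
  apply List.map_congr_left
  intro c _
  rw [PySem.Dict.getD_foldl_modify_append, pvInit_getD, List.nil_append, hl,
      List.filter_map, List.map_map]
  simp [Function.comp_def]
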